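-- pv_equiv track=rewrite | github.com/YOliver/NOmoney | CMDTool.py | PaintFrame
-- ===== SOURCE A (Python) =====
-- def PaintFrame(cnt, ylong, xlong, FrameChar, PaddingChar):
--     BoardThisTime = []
--     for _ in range(cnt):
--         for j in range(ylong):
--             itemhorizontal = ""
--             for i in range(xlong):
--                 if j == 0 or j == ylong - 1:
--                     itemhorizontal=itemhorizontal+FrameChar
--                 else:
--                     if i == 0 or i == xlong - 1:
--                         itemhorizontal=itemhorizontal+FrameChar
--                     else:
--                         itemhorizontal=itemhorizontal+PaddingChar
--             if j >= len(BoardThisTime):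
--                 BoardThisTime.append("")
--             BoardThisTime[j] = BoardThisTime[j] + itemhorizontal
--     return BoardThisTime
-- ===== SOURCE B (Python) =====
-- def PaintFrame(cnt, ylong, xlong, FrameChar, PaddingChar):
--     if cnt <= 0 or ylong <= 0:
--         return []
--     n = max(xlong, 0)
--     border = FrameChar * n
--     middle = border if n <= 2 else FrameChar + PaddingChar * (n - 2) + FrameChar
--     return [(border if j == 0 or j == ylong - 1 else middle) * cnt
--             for j in range(ylong)]
-- ===== Notes on version B (the rewrite author's own statement) =====
-- stated objective: simpler
-- what changed: B precomputes the two row patterns (border and middle) once and builds each row as pattern * cnt via a single comprehension, replacing A's triple nested per-character loop with its in-place board accumulation across cnt passes.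
import Mathlib
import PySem

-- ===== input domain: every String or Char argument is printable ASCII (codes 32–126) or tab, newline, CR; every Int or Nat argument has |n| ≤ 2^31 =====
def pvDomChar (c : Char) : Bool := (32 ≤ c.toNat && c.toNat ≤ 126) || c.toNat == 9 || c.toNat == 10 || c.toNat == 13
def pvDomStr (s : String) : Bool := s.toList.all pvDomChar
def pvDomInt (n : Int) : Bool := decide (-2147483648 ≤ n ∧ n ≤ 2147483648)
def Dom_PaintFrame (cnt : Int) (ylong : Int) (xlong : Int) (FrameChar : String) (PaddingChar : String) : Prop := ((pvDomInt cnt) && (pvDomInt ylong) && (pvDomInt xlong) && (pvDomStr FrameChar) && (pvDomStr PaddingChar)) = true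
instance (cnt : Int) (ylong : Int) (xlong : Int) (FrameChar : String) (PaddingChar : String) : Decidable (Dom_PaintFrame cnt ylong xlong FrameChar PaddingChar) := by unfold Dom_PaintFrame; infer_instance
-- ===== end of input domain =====

-- B replaces A's triple nested per-character loop (run cnt times over a mutated board)
-- with two precomputed row patterns and a single comprehension building each row as
-- pattern * cnt: simpler, one pass. Strings are carried as their List Char contents
-- (String.ofList at the end), the exact model of Python str concatenation.

-- ===== PORT A =====
-- the inner 'for i in range(xlong)' loop building itemhorizontal
def pvRowA (ylong : Int) (xlong : Int) (F P : List Char) (j : Int) : List Char :=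
  (PySem.List.pyRange 0 xlong 1).foldl
    (fun s i =>
      if j = 0 ∨ j = ylong - 1 then s ++ F
      else if i = 0 ∨ i = xlong - 1 then s ++ F
      else s ++ P) []

-- 'if j >= len(BoardThisTime): append(""); BoardThisTime[j] = BoardThisTime[j] + itemhorizontal'
-- (j from range(ylong) is ≥ 0 and after the append j < len, so j.toNat set/getD is exact)
def pvStepA (ylong : Int) (xlong : Int) (F P : List Char)
    (board : List (List Char)) (j : Int) : List (List Char) :=
  let item := pvRowA ylong xlong F P j
  let board := if (board.length : Int) ≤ j then board ++ [[]] else board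
  board.set j.toNat (board.getD j.toNat [] ++ item)

def PaintFrame (cnt : Int) (ylong : Int) (xlong : Int) (FrameChar : String) (PaddingChar : String) : List String :=
  ((PySem.List.pyRange 0 cnt 1).foldl
    (fun board _ =>
      (PySem.List.pyRange 0 ylong 1).foldl
        (pvStepA ylong xlong FrameChar.toList PaddingChar.toList) board)
    []).map String.ofList

-- ===== PORT B =====
-- Python 's * n' on the List Char contents
def pvRep (s : List Char) (n : Int) : List Char := (List.replicate n.toNat s).flatten

def PaintFrame_alt (cnt : Int) (ylong : Int) (xlong : Int) (FrameChar : String) (PaddingChar : String) : List String :=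
  if cnt ≤ 0 ∨ ylong ≤ 0 then []
  else
    let F := FrameChar.toList
    let P := PaddingChar.toList
    let n := max xlong 0
    let border := pvRep F n
    let middle := if n ≤ 2 then border else F ++ pvRep P (n - 2) ++ F
    (PySem.List.pyRange 0 ylong 1).map
      (fun j => String.ofList (pvRep (if j = 0 ∨ j = ylong - 1 then border else middle) cnt))

-- ===== PRECONDITION & SPEC =====
def Spec_PaintFrame (cnt : Int) (ylong : Int) (xlong : Int) (FrameChar : String) (PaddingChar : String) (out : List String) : Prop := out = PaintFrame_alt cnt ylong xlong FrameChar PaddingChar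
instance (cnt : Int) (ylong : Int) (xlong : Int) (FrameChar : String) (PaddingChar : String) (out : List String) : Decidable (Spec_PaintFrame cnt ylong xlong FrameChar PaddingChar out) := by unfold Spec_PaintFrame; infer_instance

-- ===== CLAIM (what is proved, stated in full; the proofs are below) =====
def Claim_equal_PaintFrame : Prop := ∀ (cnt : Int) (ylong : Int) (xlong : Int) (FrameChar : String) (PaddingChar : String), Dom_PaintFrame cnt ylong xlong FrameChar PaddingChar → Spec_PaintFrame cnt ylong xlong FrameChar PaddingChar (PaintFrame cnt ylong xlong FrameChar PaddingChar)

-- ===== LEMMAS AND PROOFS =====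

-- a fold that appends the same chunk once per element
theorem pv_foldl_const_append {α : Type} (F : List Char) (l : List α) (acc : List Char) :
    l.foldl (fun s (_ : α) => s ++ F) acc = acc ++ (List.replicate l.length F).flatten := by
  induction l generalizing acc with
  | nil => simp
  | cons a t ih => simp [ih, List.replicate_succ]

-- A's inner character loop computes exactly B's two patterns
theorem pv_row_eq (ylong xlong : Int) (F P : List Char) (j : Int) :
    pvRowA ylong xlong F P j =
      (if j = 0 ∨ j = ylong - 1 then pvRep F (max xlong 0)
       else if max xlong 0 ≤ 2 then pvRep F (max xlong 0)
       else F ++ pvRep P (max xlong 0 - 2) ++ F) := by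
  have hmax : (max xlong 0).toNat = xlong.toNat := by omega
  by_cases hj : j = 0 ∨ j = ylong - 1
  · simp only [pvRowA, if_pos hj]
    rw [pv_foldl_const_append F]
    simp [pvRep, PySem.List.length_pyRange_one, hmax]
  · simp only [pvRowA, if_neg hj]
    by_cases hx : xlong ≤ 2
    · rw [if_pos (by omega : max xlong 0 ≤ 2)]
      by_cases h0 : xlong ≤ 0
      · rw [PySem.List.pyRange_one_eq_nil h0]
        simp [pvRep, show (max xlong 0).toNat = 0 by omega]
      · by_cases h1 : xlong = 1
        · subst h1
          rw [show PySem.List.pyRange 0 1 1 = [0] by decide]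
          simp [pvRep]
        · have h2 : xlong = 2 := by omega
          subst h2
          rw [show PySem.List.pyRange 0 2 1 = [0, 1] by decide]
          simp [pvRep, List.replicate_succ]
    · rw [if_neg (by omega : ¬ max xlong 0 ≤ 2)]
      have hsplit : PySem.List.pyRange 0 xlong 1
          = 0 :: (PySem.List.pyRange 1 (xlong - 1) 1 ++ PySem.List.pyRange (xlong - 1) xlong 1) := by
        rw [PySem.List.pyRange_one_cons (by omega),
            show (0:Int) + 1 = 1 from rfl,
            PySem.List.pyRange_one_append 1 (xlong - 1) xlong (by omega) (by omega)]
      have hlast : PySem.List.pyRange (xlong - 1) xlong 1 = [xlong - 1] := by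
        have h := PySem.List.pyRange_one_singleton (xlong - 1)
        rwa [show xlong - 1 + 1 = xlong from by omega] at h
      rw [hsplit, hlast]
      simp only [List.foldl_cons, List.foldl_append, List.nil_append, List.foldl_nil,
                 or_true, true_or, if_true]
      rw [PySem.List.foldl_congr_mem (PySem.List.pyRange 1 (xlong - 1) 1)
            (fun s i => if i = 0 ∨ i = xlong - 1 then s ++ F else s ++ P)
            (fun s _ => s ++ P) F
            (by
              intro acc x hxmem
              rcases (PySem.List.mem_pyRange_one).1 hxmem with ⟨hx1, hx2⟩
              simp [show ¬(x = 0 ∨ x = xlong - 1) by omega])]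
      rw [pv_foldl_const_append P]
      simp only [PySem.List.length_pyRange_one]
      simp [pvRep, show (xlong - 1 - 1).toNat = (max xlong 0 - 2).toNat by omega]


-- filling an initially short board: rows m..ylong-1 are appended
theorem pv_fill_from (ylong xlong : Int) (F P : List Char) :
    ∀ (k : Nat) (m : Int) (board : List (List Char)), 0 ≤ m → (ylong - m).toNat = k →
      board.length = m.toNat →
      (PySem.List.pyRange m ylong 1).foldl (pvStepA ylong xlong F P) board
        = board ++ (PySem.List.pyRange m ylong 1).map (pvRowA ylong xlong F P) := by
  intro k
  induction k with
  | zero =>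
    intro m board hm hk hlen
    rw [PySem.List.pyRange_one_eq_nil (by omega)]
    simp
  | succ k ih =>
    intro m board hm hk hlen
    rw [PySem.List.pyRange_one_cons (by omega)]
    simp only [List.foldl_cons, List.map_cons]
    have hstep : pvStepA ylong xlong F P board m = board ++ [pvRowA ylong xlong F P m] := by
      simp only [pvStepA]
      rw [if_pos (by omega : ((board.length : Int) ≤ m))]
      have hgetD : (board ++ [([] : List Char)]).getD m.toNat [] = [] := by
        rw [List.getD_eq_getElem?_getD, List.getElem?_append_right (by omega)]
        simp [show m.toNat - board.length = 0 by omega]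
      rw [hgetD, List.set_append, if_neg (by omega : ¬ m.toNat < board.length)]
      simp [show m.toNat - board.length = 0 by omega]
    rw [hstep, ih (m + 1) (board ++ [pvRowA ylong xlong F P m]) (by omega) (by omega)
          (by simp [hlen]; omega)]
    simp

-- a full-length board: each existing row is extended in place
theorem pv_accum (ylong xlong : Int) (F P : List Char) :
    ∀ (y : Nat) (b : List (List Char)), y ≤ b.length →
      (PySem.List.pyRange 0 (y : Int) 1).foldl (pvStepA ylong xlong F P) b
        = (List.range y).map (fun k => b.getD k [] ++ pvRowA ylong xlong F P (k : Int))
            ++ b.drop y := by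
  intro y
  induction y with
  | zero =>
    intro b h
    simp [PySem.List.pyRange_one_eq_nil (by omega : (0:Int) ≤ 0)]
  | succ y ih =>
    intro b h
    rw [show ((y + 1 : Nat) : Int) = (y : Int) + 1 by push_cast; ring,
        PySem.List.pyRange_one_succ_right (by positivity), List.foldl_append,
        ih b (by omega)]
    simp only [List.foldl_cons, List.foldl_nil]
    have hy : y < b.length := by omega
    have hlenL : ((List.range y).map
        (fun k => b.getD k [] ++ pvRowA ylong xlong F P (k : Int))).length = y := by simp
    simp only [pvStepA]
    rw [if_neg (by simp; omega :
        ¬ ((((List.range y).map (fun k => b.getD k [] ++ pvRowA ylong xlong F P (k : Int))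
              ++ b.drop y).length : Int) ≤ (y : Int)))]
    have hgetD : ((List.range y).map
          (fun k => b.getD k [] ++ pvRowA ylong xlong F P (k : Int)) ++ b.drop y).getD
          (y : Int).toNat [] = b.getD y [] := by
      rw [List.getD_eq_getElem?_getD, Int.toNat_natCast,
          List.getElem?_append_right (by omega), hlenL]
      simp [List.getElem?_drop, List.getD_eq_getElem?_getD]
    rw [hgetD, Int.toNat_natCast, List.set_append, if_neg (by omega : ¬ y < ((List.range y).map
        (fun k => b.getD k [] ++ pvRowA ylong xlong F P (k : Int))).length),
        hlenL]
    rw [List.drop_eq_getElem_cons hy, Nat.sub_self, List.set_cons_zero, List.range_succ]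
    simp [List.getD_eq_getElem?_getD]

-- a foldl that ignores the loop variable is function iteration
theorem pv_foldl_ignore {α β : Type} (f : β → β) (l : List α) (init : β) :
    l.foldl (fun b _ => f b) init = f^[l.length] init := by
  induction l generalizing init with
  | nil => simp
  | cons a t ih => simp [ih, Function.iterate_succ_apply]

-- ylong ≤ 0: the board stays empty
theorem pv_iter_nil (ylong xlong : Int) (F P : List Char) (h : ylong ≤ 0) (n : Nat) :
    (fun board => (PySem.List.pyRange 0 ylong 1).foldl (pvStepA ylong xlong F P) board)^[n] []
      = [] := by
  induction n with
  | zero => simp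
  | succ n ih => rw [Function.iterate_succ_apply', ih]; simp [PySem.List.pyRange_one_eq_nil h]

-- after n+1 outer passes each row j holds its pattern repeated n+1 times
theorem pv_iter (ylong xlong : Int) (F P : List Char) (n : Nat) :
    (fun board => (PySem.List.pyRange 0 ylong 1).foldl (pvStepA ylong xlong F P) board)^[n + 1] []
      = (PySem.List.pyRange 0 ylong 1).map
          (fun j => (List.replicate (n + 1) (pvRowA ylong xlong F P j)).flatten) := by
  induction n with
  | zero =>
    simp only [zero_add, Function.iterate_one]
    by_cases hy : ylong ≤ 0
    · simp [PySem.List.pyRange_one_eq_nil hy]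
    · rw [pv_fill_from ylong xlong F P ylong.toNat 0 [] le_rfl (by omega) rfl]
      simp
  | succ n ih =>
    rw [Function.iterate_succ_apply', ih]
    by_cases hy : ylong ≤ 0
    · simp [PySem.List.pyRange_one_eq_nil hy]
    · have hy' : ylong = ((ylong.toNat : Nat) : Int) := by omega
      rw [hy']
      have hb : ((PySem.List.pyRange 0 ((ylong.toNat : Nat) : Int) 1).map
          (fun j => (List.replicate (n + 1)
            (pvRowA ((ylong.toNat : Nat) : Int) xlong F P j)).flatten)).length
          = ylong.toNat := by
        simp [PySem.List.length_pyRange_one]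
        omega
      rw [pv_accum ((ylong.toNat : Nat) : Int) xlong F P ylong.toNat _ (le_of_eq hb.symm),
          List.drop_of_length_le (le_of_eq hb), List.append_nil,
          PySem.List.pyRange_zero_natCast]
      simp only [List.map_map]
      refine List.map_congr_left ?_
      intro k hk
      rw [List.mem_range] at hk
      simp only [Function.comp]
      rw [List.getD_eq_getElem?_getD]
      simp [hk, List.replicate_succ' (n := n + 1)]

-- ===== VERDICT (by name: the statement is the Claim_ definition above) =====
theorem PaintFrame_spec : Claim_equal_PaintFrame := by
  intro cnt ylong xlong FrameChar PaddingChar _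
  unfold Spec_PaintFrame PaintFrame
  rw [pv_foldl_ignore
        (fun board => (PySem.List.pyRange 0 ylong 1).foldl
          (pvStepA ylong xlong FrameChar.toList PaddingChar.toList) board)]
  by_cases hc : cnt ≤ 0
  · rw [PySem.List.length_pyRange_one, show (cnt - 0).toNat = 0 by omega]
    simp [PaintFrame_alt, hc]
  · by_cases hy : ylong ≤ 0
    · rw [pv_iter_nil ylong xlong FrameChar.toList PaddingChar.toList hy]
      simp [PaintFrame_alt, hy]
    · rw [PySem.List.length_pyRange_one,
          show (cnt - 0).toNat = (cnt.toNat - 1) + 1 by omega,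
          pv_iter]
      rw [PaintFrame_alt, if_neg (by omega : ¬ (cnt ≤ 0 ∨ ylong ≤ 0))]
      simp only [List.map_map]
      refine List.map_congr_left ?_
      intro j hj
      simp only [Function.comp]
      rw [pv_row_eq]
      congr 1
      simp only [pvRep]
      rw [show cnt.toNat - 1 + 1 = cnt.toNat by omega]
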